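-- pv_equiv track=rewrite | github.com/MarcoTz/stuff | 6174/6174.py | dig_minmax
-- ===== SOURCE A (Python) =====
-- def dig_minmax(i, highest=True):
--     ls = nr_to_list(i)
--     ls.sort()
--     if not highest:
--         ls.reverse()
--     res = 0
--     for i in range(0,len(ls)):
--         res += ls[i]*pow(10,i)
--
--     return res
--
-- def nr_to_list(i):
--     s = str(i)
--     ls = []
--     for c in s:
--         ls.append(int(c))
--     return ls
-- ===== SOURCE B (Python) =====
-- def dig_minmax(i, highest=True):
--     # Counting reconstruction instead of sort: tally each digit's multiplicity,
--     # then emit digits in ascending (highest) / descending (lowest) value order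
--     # into increasing powers of ten.
--     digits = [int(c) for c in str(i)]
--     res = 0
--     place = 1
--     for d in (range(10) if highest else range(9, -1, -1)):
--         for _ in range(digits.count(d)):
--             res += d * place
--             place *= 10
--     return res
-- ===== Notes on version B (the rewrite author's own statement) =====
-- stated objective: alternative
-- what changed: B replaces A's sort-then-positional-sum (sort the digit list, reverse for lowest, then sum ls[k]*10**k) by a sortless counting reconstruction: it tallies digit multiplicities and emits each digit value 0..9 (or 9..0) into increasing powers of ten with a running place accumulator.
import Mathlib
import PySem

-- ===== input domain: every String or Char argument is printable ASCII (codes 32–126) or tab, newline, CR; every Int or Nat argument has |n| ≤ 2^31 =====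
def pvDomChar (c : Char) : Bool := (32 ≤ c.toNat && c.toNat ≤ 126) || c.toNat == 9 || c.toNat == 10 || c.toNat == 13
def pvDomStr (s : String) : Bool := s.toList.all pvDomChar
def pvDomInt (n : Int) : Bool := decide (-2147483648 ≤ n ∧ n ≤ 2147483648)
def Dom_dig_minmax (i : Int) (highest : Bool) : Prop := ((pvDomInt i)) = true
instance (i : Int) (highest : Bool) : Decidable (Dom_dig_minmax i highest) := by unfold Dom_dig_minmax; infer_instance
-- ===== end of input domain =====

-- B replaces A's sort-then-positional-sum by a sortless counting reconstruction
-- (tally digit multiplicities, emit digit values in order into increasing powers of ten);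
-- objective: alternative algorithm, same result.

-- ===== PORT A =====
-- nr_to_list: 'for c in str(i): ls.append(int(c))'; int('-') raises ValueError → none
def nr_to_list (i : Int) : Option (List Int) :=
  (PySem.Int.toChars i).foldl
    (fun acc c => acc.bind (fun ls => (PySem.Int.ofChars? [c]).map (fun d => ls ++ [d])))
    (some [])

def dig_minmax (i : Int) (highest : Bool) : Int :=
  match nr_to_list i with
  | none => 0   -- int(c) raised (negative i): outside Pre_dig_minmax, value unclaimed
  | some ls0 =>
    let ls1 := PySem.List.sorted ls0 (fun x => x) false
    let ls := if !highest then ls1.reverse else ls1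
    (PySem.List.pyRange 0 (PySem.List.len ls) 1).foldl
      (fun res k => res + PySem.List.pyGetD ls k 0 * 10 ^ k.toNat) 0

-- ===== PORT B =====
-- '[int(c) for c in str(i)]'; int('-') raises ValueError → none
def pvDigits? : List Char → Option (List Int)
  | [] => some []
  | c :: cs => do
    let d ← PySem.Int.ofChars? [c]
    let rest ← pvDigits? cs
    pure (d :: rest)

def dig_minmax_alt (i : Int) (highest : Bool) : Int :=
  match pvDigits? (PySem.Int.toChars i) with
  | none => 0   -- int(c) raised (negative i): outside Pre_dig_minmax, value unclaimed
  | some digits =>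
    let order := if highest then PySem.List.pyRange 0 10 1 else PySem.List.pyRange 9 (-1) (-1)
    (order.foldl
      (fun (p : Int × Int) d =>
        (PySem.List.pyRange 0 ((PySem.List.count digits d : Nat) : Int) 1).foldl
          (fun (q : Int × Int) _ => (q.1 + d * q.2, q.2 * 10)) p)
      (0, 1)).1

-- ===== PRECONDITION & SPEC =====
-- Pre_ excludes i < 0, where Python's int('-') raises ValueError in both A and B.
def Pre_dig_minmax (i : Int) (highest : Bool) : Prop := 0 ≤ i
instance (i : Int) (highest : Bool) : Decidable (Pre_dig_minmax i highest) := by unfold Pre_dig_minmax; infer_instance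
def pvWitness_dig_minmax : Int × Bool := (174, true)

def Spec_dig_minmax (i : Int) (highest : Bool) (out : Int) : Prop := out = dig_minmax_alt i highest
instance (i : Int) (highest : Bool) (out : Int) : Decidable (Spec_dig_minmax i highest out) := by unfold Spec_dig_minmax; infer_instance

-- ===== CLAIM (what is proved, stated in full; the proofs are below) =====
def Claim_equal_dig_minmax : Prop := ∀ (i : Int) (highest : Bool), Dom_dig_minmax i highest → Pre_dig_minmax i highest → Spec_dig_minmax i highest (dig_minmax i highest)

-- ===== LEMMAS AND PROOFS =====

-- any digit character parses (as int(c)) to some value in [0, 10)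
theorem pv_ofChars_digit (c : Char) (h : c.isDigit = true) :
    ∃ d : Int, PySem.Int.ofChars? [c] = some d ∧ 0 ≤ d ∧ d < 10 := by
  have h2 : 48 ≤ c.toNat ∧ c.toNat ≤ 57 := by
    simp [Char.isDigit] at h; exact ⟨h.1, h.2⟩
  obtain ⟨h1, h3⟩ := h2
  have hc : Char.ofNat c.toNat = c := Char.ofNat_toNat c
  interval_cases h : c.toNat <;> rw [← hc] <;>
    first
    | exact ⟨0, by decide⟩ | exact ⟨1, by decide⟩ | exact ⟨2, by decide⟩
    | exact ⟨3, by decide⟩ | exact ⟨4, by decide⟩ | exact ⟨5, by decide⟩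
    | exact ⟨6, by decide⟩ | exact ⟨7, by decide⟩ | exact ⟨8, by decide⟩
    | exact ⟨9, by decide⟩

theorem pv_toChars_digits (i : Int) (h : 0 ≤ i) :
    ∀ c ∈ PySem.Int.toChars i, c.isDigit = true := by
  intro c hc
  simp only [PySem.Int.toChars] at hc
  rw [if_neg (by omega)] at hc
  exact Nat.isDigit_of_mem_toDigits (by norm_num) (by norm_num) hc

theorem pv_digits_some (cs : List Char) (h : ∀ c ∈ cs, c.isDigit = true) :
    ∃ ds : List Int, pvDigits? cs = some ds ∧ ∀ d ∈ ds, 0 ≤ d ∧ d < 10 := by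
  induction cs with
  | nil => exact ⟨[], rfl, by simp⟩
  | cons c cs ih =>
    obtain ⟨d, hd, hd0, hd10⟩ := pv_ofChars_digit c (h c (by simp))
    obtain ⟨ds, hds, hb⟩ := ih (fun x hx => h x (by simp [hx]))
    refine ⟨d :: ds, by simp [pvDigits?, hd, hds], ?_⟩
    intro x hx
    rcases List.mem_cons.mp hx with rfl | hx
    · exact ⟨hd0, hd10⟩
    · exact hb x hx

theorem pv_nr_none (cs : List Char) :
    cs.foldl (fun acc c => acc.bind (fun ls => (PySem.Int.ofChars? [c]).map (fun d => ls ++ [d])))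
      (none : Option (List Int)) = none := by
  induction cs with
  | nil => rfl
  | cons c cs ih => simpa using ih

theorem pv_nr_aux (cs : List Char) (acc : List Int) :
    cs.foldl (fun acc c => acc.bind (fun ls => (PySem.Int.ofChars? [c]).map (fun d => ls ++ [d])))
      (some acc) = (pvDigits? cs).map (fun l => acc ++ l) := by
  induction cs generalizing acc with
  | nil => simp [pvDigits?]
  | cons c cs ih =>
    simp only [List.foldl_cons, Option.bind_some]
    cases hd : PySem.Int.ofChars? [c] with
    | none => simp [pv_nr_none, pvDigits?, hd]
    | some d =>
      simp only [Option.map_some, ih]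
      cases hds : pvDigits? cs with
      | none => simp [pvDigits?, hd, hds]
      | some ds => simp [pvDigits?, hd, hds]

-- the positional value both programs build: poly [d0, d1, ...] = d0 + 10*d1 + ...
def pvPoly : List Int → Int
  | [] => 0
  | d :: t => d + 10 * pvPoly t

theorem pv_foldl_step (l : List Int) (r p : Int) :
    (l.foldl (fun (q : Int × Int) d => (q.1 + d * q.2, q.2 * 10)) (r, p)).1
      = r + p * pvPoly l := by
  induction l generalizing r p with
  | nil => simp [pvPoly]
  | cons d t ih => simp [pvPoly, ih]; ring

theorem pv_sum_range (ls : List Int) :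
    ((List.range ls.length).map (fun k => ls.getD k 0 * 10 ^ k)).sum = pvPoly ls := by
  induction ls with
  | nil => simp [pvPoly]
  | cons d t ih =>
    rw [List.length_cons, List.range_succ_eq_map]
    simp only [List.map_cons, List.map_map, List.sum_cons, Function.comp_def]
    have hmap : (fun k => (d :: t).getD (k + 1) 0 * 10 ^ (k + 1))
        = fun k => t.getD k 0 * 10 ^ k * 10 := by
      funext k; simp [pow_succ, mul_assoc]
    rw [hmap, List.sum_map_mul_right, ih, pvPoly]
    simp [mul_comm]

theorem pv_A_sum (ls : List Int) :
    (PySem.List.pyRange 0 (PySem.List.len ls) 1).foldl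
      (fun res k => res + PySem.List.pyGetD ls k 0 * 10 ^ k.toNat) 0 = pvPoly ls := by
  rw [PySem.List.foldl_add (g := fun k => PySem.List.pyGetD ls k 0 * 10 ^ k.toNat)]
  rw [PySem.List.pyRange_one, PySem.List.len_eq]
  simp only [List.map_map, Function.comp_def, zero_add, Int.sub_zero, Int.toNat_natCast,
    PySem.List.pyGetD_natCast]
  simpa using pv_sum_range ls

theorem pv_repeat_fold (n : Nat) (d : Int) (q : Int × Int) :
    (PySem.List.pyRange 0 (n : Int) 1).foldl (fun (q : Int × Int) _ => (q.1 + d * q.2, q.2 * 10)) q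
      = (List.replicate n d).foldl (fun (q : Int × Int) x => (q.1 + x * q.2, q.2 * 10)) q := by
  induction n generalizing q with
  | zero => simp [PySem.List.pyRange_one_eq_nil]
  | succ n ih =>
    rw [show ((n + 1 : Nat) : Int) = (n : Int) + 1 by push_cast; ring,
        PySem.List.pyRange_one_succ_right (by positivity),
        List.replicate_succ', List.foldl_append, List.foldl_append, ih]
    simp

theorem pv_foldl_flatMap (order : List Int) (g : Int → List Int)
    (f : Int × Int → Int → Int × Int) (init : Int × Int) :
    order.foldl (fun p d => (g d).foldl f p) init = (order.flatMap g).foldl f init := by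
  induction order generalizing init with
  | nil => rfl
  | cons v vs ih => simp [List.flatMap_cons, List.foldl_append, ih]

theorem pv_count_flat (ds vs : List Int) (hnd : vs.Nodup) (a : Int) :
    (vs.flatMap (fun d => List.replicate (ds.count d) d)).count a
      = if a ∈ vs then ds.count a else 0 := by
  induction vs with
  | nil => simp
  | cons v vs ih =>
    rw [List.nodup_cons] at hnd
    rw [List.flatMap_cons, List.count_append, ih hnd.2, List.count_replicate]
    by_cases hav : a = v
    · subst hav
      simp [hnd.1]
    · simp [Ne.symm hav, hav]

theorem pv_perm (ds vs : List Int) (hnd : vs.Nodup) (hsub : ∀ x ∈ ds, x ∈ vs) :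
    (vs.flatMap (fun d => List.replicate (ds.count d) d)).Perm ds := by
  rw [List.perm_iff_count]
  intro a
  rw [pv_count_flat ds vs hnd a]
  by_cases ha : a ∈ vs
  · simp [ha]
  · simp [ha, List.count_eq_zero.mpr (fun hmem => ha (hsub a hmem))]

theorem pv_pairwise (vs : List Int) (c : Int → Nat) (h : vs.Pairwise (· ≤ ·)) :
    (vs.flatMap (fun d => List.replicate (c d) d)).Pairwise (· ≤ ·) := by
  induction vs with
  | nil => simp
  | cons v vs ih =>
    rw [List.pairwise_cons] at h
    rw [List.flatMap_cons, List.pairwise_append]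
    refine ⟨List.pairwise_replicate.mpr (Or.inr le_rfl), ih h.2, ?_⟩
    intro x hx y hy
    obtain rfl := (List.eq_of_mem_replicate hx)
    obtain ⟨w, hw, hyw⟩ := List.mem_flatMap.mp hy
    rw [List.eq_of_mem_replicate hyw]
    exact h.1 w hw

-- the ascending counting emission IS the sorted digit list
theorem pv_sorted_eq (ds : List Int) (hb : ∀ d ∈ ds, 0 ≤ d ∧ d < 10) :
    PySem.List.sorted ds (fun x => x) false
      = ([0,1,2,3,4,5,6,7,8,9] : List Int).flatMap (fun d => List.replicate (ds.count d) d) := by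
  apply PySem.List.sorted_id_eq_of_perm_of_pairwise
  · exact pv_perm ds _ (by decide) (fun x hx => by
      have := hb x hx; simp; omega)
  · exact pv_pairwise _ _ (by decide)

theorem pv_B_gen (ds : List Int) (order : List Int) :
    (order.foldl
      (fun (p : Int × Int) d =>
        (PySem.List.pyRange 0 ((PySem.List.count ds d : Nat) : Int) 1).foldl
          (fun (q : Int × Int) _ => (q.1 + d * q.2, q.2 * 10)) p)
      (0, 1)).1
    = pvPoly (order.flatMap (fun d => List.replicate (ds.count d) d)) := by
  have h1 : order.foldl
      (fun (p : Int × Int) d =>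
        (PySem.List.pyRange 0 ((PySem.List.count ds d : Nat) : Int) 1).foldl
          (fun (q : Int × Int) _ => (q.1 + d * q.2, q.2 * 10)) p)
      (0, 1)
      = order.foldl
        (fun (p : Int × Int) d =>
          (List.replicate (ds.count d) d).foldl
            (fun (q : Int × Int) x => (q.1 + x * q.2, q.2 * 10)) p)
        (0, 1) := by
    apply PySem.List.foldl_congr_mem
    intro acc x _
    exact pv_repeat_fold (PySem.List.count ds x) x acc
  rw [h1, pv_foldl_flatMap, pv_foldl_step]
  ring

-- ===== VERDICT (by name: the statement is the Claim_ definition above) =====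
theorem dig_minmax_spec : Claim_equal_dig_minmax := by
  intro i highest hdom hpre
  unfold Spec_dig_minmax
  have hall := pv_toChars_digits i hpre
  obtain ⟨ds, hds, hb⟩ := pv_digits_some _ hall
  have hnr : nr_to_list i = some ds := by
    unfold nr_to_list
    rw [pv_nr_aux, hds]
    simp
  have hsorted := pv_sorted_eq ds hb
  have hasc : PySem.List.pyRange 0 10 1 = ([0,1,2,3,4,5,6,7,8,9] : List Int) := by decide
  have hdesc : PySem.List.pyRange 9 (-1) (-1) = ([9,8,7,6,5,4,3,2,1,0] : List Int) := by decide
  cases highest with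
  | true =>
    simp only [dig_minmax, dig_minmax_alt, hnr, hds, Bool.not_true, if_true, Bool.false_eq_true,
      if_false, pv_A_sum, pv_B_gen, hasc, hsorted]
  | false =>
    simp only [dig_minmax, dig_minmax_alt, hnr, hds, Bool.not_false, if_true, if_false,
      Bool.false_eq_true, pv_A_sum, pv_B_gen, hdesc, hsorted]
    rw [List.reverse_flatMap]
    norm_num [Function.comp_def, List.reverse_replicate]
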